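-- pv_equiv track=rewrite | github.com/alberto-rota/GateTracker | gatetracker/utils/engine_init.py | _count_optimizer_scheduler_steps
-- ===== SOURCE A (Python) =====
-- def _count_optimizer_scheduler_steps(
--     n_epochs: int,
--     batches_per_epoch: int,
--     warmup_steps: int,
--     grad_accumulation_steps: int,
-- ) -> int:
--     """How many times ``backward_pass`` calls ``LRscheduler.step()`` over full training.
--
--     Matches ``run_epoch`` logic: a step only after ``WARMUP_STEPS`` and every
--     ``GRADIENT_ACCUMULATION_STEPS`` batches (batch index *within* each epoch).
--     """
--     ga = max(1, int(grad_accumulation_steps))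
--     n_epochs = int(n_epochs)
--     batches_per_epoch = int(batches_per_epoch)
--     warmup_steps = int(warmup_steps)
--     total = 0
--     for e in range(n_epochs):
--         for b in range(batches_per_epoch):
--             step = e * batches_per_epoch + b
--             if step < warmup_steps:
--                 continue
--             if (b + 1) % ga == 0:
--                 total += 1
--     return max(1, total)
-- ===== SOURCE B (Python) =====
-- def _count_optimizer_scheduler_steps(
--     n_epochs: int,
--     batches_per_epoch: int,
--     warmup_steps: int,
--     grad_accumulation_steps: int,
-- ) -> int:
--     """O(1) closed form: every epoch past the warmup boundary contributes
--     batches_per_epoch // ga steps; only the single epoch containing the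
--     boundary is partial."""
--     ga = max(1, int(grad_accumulation_steps))
--     E = int(n_epochs)
--     B = int(batches_per_epoch)
--     W = int(warmup_steps)
--     if E <= 0 or B <= 0:
--         return 1
--     per = B // ga
--     q, r = divmod(max(W, 0), B)
--     kfull = min(q, E)
--     tail = (r // ga) if q < E else 0
--     return max(1, E * per - kfull * per - tail)
-- ===== Notes on version B (the rewrite author's own statement) =====
-- stated objective: faster
-- what changed: The double loop over epochs and batches is replaced by an O(1) closed form: each epoch yields batches_per_epoch//ga scheduler steps, epochs entirely inside warmup yield none, and the single epoch containing the warmup boundary yields batches_per_epoch//ga - (warmup%batches_per_epoch)//ga, combined with divmod and min.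
import Mathlib
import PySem

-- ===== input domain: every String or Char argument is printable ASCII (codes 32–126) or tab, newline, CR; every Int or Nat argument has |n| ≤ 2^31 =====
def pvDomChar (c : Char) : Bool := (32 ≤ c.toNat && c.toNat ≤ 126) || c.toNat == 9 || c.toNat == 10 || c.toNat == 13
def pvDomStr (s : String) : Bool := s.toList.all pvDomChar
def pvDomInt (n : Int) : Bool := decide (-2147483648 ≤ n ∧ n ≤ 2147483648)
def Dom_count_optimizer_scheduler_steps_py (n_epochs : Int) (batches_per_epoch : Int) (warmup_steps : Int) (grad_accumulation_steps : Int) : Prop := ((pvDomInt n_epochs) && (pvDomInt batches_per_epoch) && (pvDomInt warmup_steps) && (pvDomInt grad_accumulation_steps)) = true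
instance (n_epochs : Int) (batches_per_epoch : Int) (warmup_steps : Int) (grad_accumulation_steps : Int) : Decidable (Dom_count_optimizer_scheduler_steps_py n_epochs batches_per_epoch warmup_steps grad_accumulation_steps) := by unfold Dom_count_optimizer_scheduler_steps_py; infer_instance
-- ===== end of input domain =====

-- B replaces A's double loop over epochs and batches by an O(1) closed form built from
-- floor division (objective: faster, asymptotic; measured).

-- ===== PORT A =====
def count_optimizer_scheduler_steps_py (n_epochs : Int) (batches_per_epoch : Int) (warmup_steps : Int) (grad_accumulation_steps : Int) : Int :=
  let ga := max 1 grad_accumulation_steps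
  let total := (PySem.List.pyRange 0 n_epochs 1).foldl (fun total e =>
    (PySem.List.pyRange 0 batches_per_epoch 1).foldl (fun total b =>
      let step := e * batches_per_epoch + b
      if step < warmup_steps then total
      else if PySem.Int.mod (b + 1) ga = 0 then total + 1 else total) total) 0
  max 1 total

-- ===== PORT B =====
def count_optimizer_scheduler_steps_py_alt (n_epochs : Int) (batches_per_epoch : Int) (warmup_steps : Int) (grad_accumulation_steps : Int) : Int :=
  let ga := max 1 grad_accumulation_steps
  if n_epochs ≤ 0 ∨ batches_per_epoch ≤ 0 then 1
  else
    let per := PySem.Int.floordiv batches_per_epoch ga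
    let q := PySem.Int.floordiv (max warmup_steps 0) batches_per_epoch
    let r := PySem.Int.mod (max warmup_steps 0) batches_per_epoch
    let kfull := min q n_epochs
    let tail := if q < n_epochs then PySem.Int.floordiv r ga else 0
    max 1 (n_epochs * per - kfull * per - tail)

-- ===== PRECONDITION & SPEC =====
def Spec_count_optimizer_scheduler_steps_py (n_epochs : Int) (batches_per_epoch : Int) (warmup_steps : Int) (grad_accumulation_steps : Int) (out : Int) : Prop := out = count_optimizer_scheduler_steps_py_alt n_epochs batches_per_epoch warmup_steps grad_accumulation_steps
instance (n_epochs : Int) (batches_per_epoch : Int) (warmup_steps : Int) (grad_accumulation_steps : Int) (out : Int) : Decidable (Spec_count_optimizer_scheduler_steps_py n_epochs batches_per_epoch warmup_steps grad_accumulation_steps out) := by unfold Spec_count_optimizer_scheduler_steps_py; infer_instance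

-- ===== CLAIM (what is proved, stated in full; the proofs are below) =====
def Claim_equal_count_optimizer_scheduler_steps_py : Prop := ∀ (n_epochs : Int) (batches_per_epoch : Int) (warmup_steps : Int) (grad_accumulation_steps : Int), Dom_count_optimizer_scheduler_steps_py n_epochs batches_per_epoch warmup_steps grad_accumulation_steps → Spec_count_optimizer_scheduler_steps_py n_epochs batches_per_epoch warmup_steps grad_accumulation_steps (count_optimizer_scheduler_steps_py n_epochs batches_per_epoch warmup_steps grad_accumulation_steps)

-- ===== LEMMAS AND PROOFS =====

-- successor rule for Int.ediv with a positive divisor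
theorem pv_succ_ediv (a g : Int) (hg : 0 < g) :
    (a + 1) / g = a / g + (if (a + 1) % g = 0 then 1 else 0) := by
  have h0 : 0 ≤ a % g := Int.emod_nonneg a (ne_of_gt hg)
  have h1 : a % g < g := Int.emod_lt_of_pos a hg
  have hd : g * (a / g) + a % g = a := Int.mul_ediv_add_emod a g
  by_cases hc : a % g = g - 1
  · have he : a + 1 = (a / g + 1) * g := by rw [hc] at hd; linear_combination -hd
    rw [he, Int.mul_ediv_cancel _ (ne_of_gt hg)]
    simp [Int.mul_emod_left]
  · have h := (Int.ediv_emod_unique (a := a + 1) (b := g) (q := a / g) (r := a % g + 1) hg).mpr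
      ⟨by omega, by omega, by omega⟩
    rw [h.1, h.2]
    have hne : ¬ (a % g + 1 = 0) := by omega
    simp [hne]

-- A's inner loop (count of b in [0,B) with b ≥ r and (b+1) % ga = 0) in closed form
theorem pv_inner (ga r B t : Int) (hg : 0 < ga) :
    (PySem.List.pyRange 0 B 1).foldl (fun t b =>
      if b < r then t
      else if PySem.Int.mod (b + 1) ga = 0 then t + 1 else t) t
    = t + (PySem.Int.floordiv B ga - PySem.Int.floordiv (min (max r 0) B) ga) := by
  by_cases hB : B ≤ 0
  · rw [PySem.List.pyRange_one_eq_nil hB]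
    have hm : min (max r 0) B = B := by omega
    rw [hm]; simp
  · have hB : 0 < B := by omega
    have hBn : B = ((B.toNat : Int)) := by omega
    rw [hBn]
    generalize B.toNat = n
    clear hBn hB
    induction n generalizing t with
    | zero =>
      simp [PySem.List.pyRange_one_eq_nil (by omega : (0:Int) ≤ 0)]
    | succ n ih =>
      have hcast : ((n + 1 : Nat) : Int) = (n : Int) + 1 := by push_cast; ring
      rw [hcast, PySem.List.pyRange_one_succ_right (by positivity), List.foldl_append, ih]
      simp only [List.foldl_cons, List.foldl_nil]
      rw [PySem.Int.floordiv_eq_ediv_of_pos hg, PySem.Int.floordiv_eq_ediv_of_pos hg,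
          PySem.Int.floordiv_eq_ediv_of_pos hg, PySem.Int.floordiv_eq_ediv_of_pos hg,
          PySem.Int.mod_eq_emod_of_pos hg]
      have hs := pv_succ_ediv (n : Int) ga hg
      by_cases hbr : (n : Int) < r
      · have h1 : min (max r 0) ((n : Int)) = (n : Int) := by omega
        have h2 : min (max r 0) ((n : Int) + 1) = (n : Int) + 1 := by omega
        rw [if_pos hbr, h1, h2]; ring
      · have h1 : min (max r 0) ((n : Int) + 1) = min (max r 0) ((n : Int)) := by omega
        rw [if_neg hbr, h1, hs]
        split_ifs with h
        · ring
        · ring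

theorem pv_foldl_id (L : List Int) (t : Int) : L.foldl (fun t (_ : Int) => t) t = t := by
  induction L generalizing t with
  | nil => rfl
  | cons x xs ih => simp [List.foldl_cons, ih]

-- the outer sum of per-epoch closed forms, itself in closed form (0 ≤ W, 0 < B)
theorem pv_sum (B W ga : Int) (hW : 0 ≤ W) (hB : 0 < B) (n : Nat) (t : Int) :
    (PySem.List.pyRange 0 (n : Int) 1).foldl
      (fun t e => t + (B / ga - (min (max (W - e * B) 0) B) / ga)) t
    = t + ((n : Int) * (B / ga) - min (W / B) (n : Int) * (B / ga)
        - (if W / B < (n : Int) then (W % B) / ga else 0)) := by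
  have hq : B * (W / B) + W % B = W := Int.mul_ediv_add_emod W B
  have hq' : (W / B) * B + W % B = W := by linear_combination hq
  have hr0 : 0 ≤ W % B := Int.emod_nonneg W (ne_of_gt hB)
  have hr1 : W % B < B := Int.emod_lt_of_pos W hB
  have hdiv0 : 0 ≤ W / B := Int.ediv_nonneg hW hB.le
  induction n generalizing t with
  | zero =>
    simp only [Nat.cast_zero]
    rw [PySem.List.pyRange_one_eq_nil (by omega : (0:Int) ≤ 0)]
    simp only [List.foldl_nil]
    rw [min_eq_right hdiv0, if_neg (by omega)]
    ring
  | succ n ih =>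
    have hcast : ((n + 1 : Nat) : Int) = (n : Int) + 1 := by push_cast; ring
    rw [hcast, PySem.List.pyRange_one_succ_right (by positivity), List.foldl_append, ih]
    simp only [List.foldl_cons, List.foldl_nil]
    rcases lt_trichotomy ((n : Int)) (W / B) with h | h | h
    · -- epoch entirely inside warmup: clamp = B
      have hmul : B * ((n : Int) + 1) ≤ B * (W / B) :=
        mul_le_mul_of_nonneg_left (by omega) hB.le
      have hWn : B ≤ W - (n : Int) * B := by nlinarith [hmul, hq, hr0]
      have hc : min (max (W - (n : Int) * B) 0) B = B := by omega
      rw [hc, min_eq_right h.le, min_eq_right (by omega : (n : Int) + 1 ≤ W / B),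
          if_neg (by omega), if_neg (by omega)]
      ring
    · -- the boundary epoch: clamp = W % B
      have hc : min (max (W - (n : Int) * B) 0) B = W % B := by
        have : W - (n : Int) * B = W % B := by rw [h]; linear_combination -hq'
        omega
      rw [hc, ← h, min_self, min_eq_left (by omega : (n : Int) ≤ (n : Int) + 1),
          if_neg (by omega), if_pos (by omega), h]
      ring
    · -- epoch entirely past warmup: clamp = 0
      have hmul : B * (W / B + 1) ≤ B * (n : Int) :=
        mul_le_mul_of_nonneg_left (by omega) hB.le
      have hWn : W - (n : Int) * B ≤ 0 := by nlinarith [hmul, hq, hr1]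
      have hc : min (max (W - (n : Int) * B) 0) B = 0 := by omega
      rw [hc, min_eq_left h.le, min_eq_left (by omega : W / B ≤ (n : Int) + 1),
          if_pos h, if_pos (by omega), Int.zero_ediv]
      ring

theorem pv_main (E B W G : Int) :
    count_optimizer_scheduler_steps_py E B W G = count_optimizer_scheduler_steps_py_alt E B W G := by
  unfold count_optimizer_scheduler_steps_py count_optimizer_scheduler_steps_py_alt
  have hg : (0:Int) < max 1 G := by omega
  by_cases hE : E ≤ 0
  · rw [if_pos (Or.inl hE)]
    rw [PySem.List.pyRange_one_eq_nil hE]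
    simp
  · by_cases hB : B ≤ 0
    · rw [if_pos (Or.inr hB)]
      simp only [PySem.List.pyRange_one_eq_nil hB, List.foldl_nil]
      rw [pv_foldl_id]
      simp
    · rw [if_neg (by omega)]
      have hB' : 0 < B := by omega
      dsimp only
      congr 1
      -- rewrite A's outer fold, epoch by epoch, into the per-epoch closed form
      have h1 : (PySem.List.pyRange 0 E 1).foldl (fun total e =>
          (PySem.List.pyRange 0 B 1).foldl (fun total b =>
            if e * B + b < W then total
            else if PySem.Int.mod (b + 1) (max 1 G) = 0 then total + 1 else total) total) 0
          = (PySem.List.pyRange 0 E 1).foldl (fun total e =>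
            total + (B / (max 1 G) - (min (max ((max W 0) - e * B) 0) B) / (max 1 G))) 0 := by
        apply PySem.List.foldl_congr_mem
        intro acc e he
        have he0 : 0 ≤ e := ((PySem.List.mem_pyRange_one).mp he).1
        have h2 : (PySem.List.pyRange 0 B 1).foldl (fun total b =>
            if e * B + b < W then total
            else if PySem.Int.mod (b + 1) (max 1 G) = 0 then total + 1 else total) acc
            = (PySem.List.pyRange 0 B 1).foldl (fun total b =>
            if b < W - e * B then total
            else if PySem.Int.mod (b + 1) (max 1 G) = 0 then total + 1 else total) acc := by
          apply PySem.List.foldl_congr_mem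
          intro acc' b _
          exact if_congr (by omega) rfl rfl
        rw [h2, pv_inner _ _ _ _ hg,
            PySem.Int.floordiv_eq_ediv_of_pos hg, PySem.Int.floordiv_eq_ediv_of_pos hg]
        have heB : 0 ≤ e * B := mul_nonneg he0 hB'.le
        have hc : min (max (W - e * B) 0) B = min (max ((max W 0) - e * B) 0) B := by omega
        rw [hc]
      rw [h1]
      have hEn : E = ((E.toNat : Int)) := by omega
      rw [hEn, pv_sum B (max W 0) (max 1 G) (by omega) hB' E.toNat 0,
          PySem.Int.floordiv_eq_ediv_of_pos hg, PySem.Int.floordiv_eq_ediv_of_pos hB',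
          PySem.Int.floordiv_eq_ediv_of_pos hg, PySem.Int.mod_eq_emod_of_pos hB']
      ring

-- ===== VERDICT (by name: the statement is the Claim_ definition above) =====
theorem count_optimizer_scheduler_steps_py_spec : Claim_equal_count_optimizer_scheduler_steps_py := by
  intro E B W G _
  unfold Spec_count_optimizer_scheduler_steps_py
  exact pv_main E B W G
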